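-- pv_equiv track=rewrite | github.com/Shivanilarokar/capstoneprojectdatasense | backend/orchestrator/router.py | _bounded_routes
-- ===== SOURCE A (Python) =====
-- PIPELINE_OPTIONS = ["pageindex", "sanctions", "nlsql", "graphrag", "fullstack"]
--
-- MAX_FULLSTACK_ROUTE_CALLS = 4
--
-- def _normalize_pipeline(raw: str | None) -> str:
--     value = (raw or "").strip().lower()
--     return value if value in PIPELINE_OPTIONS else "fullstack"
--
-- def _bounded_routes(routes: list[str]) -> list[str]:
--     bounded: list[str] = []
--     for route in routes:
--         normalized = _normalize_pipeline(route)
--         if normalized in PIPELINE_OPTIONS[:-1] and normalized not in bounded: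
--             bounded.append(normalized)
--         if len(bounded) >= MAX_FULLSTACK_ROUTE_CALLS:
--             break
--     return bounded
-- ===== SOURCE B (Python) =====
-- PIPELINE_OPTIONS = ["pageindex", "sanctions", "nlsql", "graphrag", "fullstack"]
--
-- MAX_FULLSTACK_ROUTE_CALLS = 4
--
-- def _normalize_pipeline(raw):
--     value = (raw or "").strip().lower()
--     return value if value in PIPELINE_OPTIONS else "fullstack"
--
-- def _bounded_routes(routes):
--     # Inverted loop: instead of scanning routes and accumulating, scan the 4
--     # allowed options and rank each present one by its first occurrence among
--     # the normalized routes.  The cap of MAX_FULLSTACK_ROUTE_CALLS (= 4) is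
--     # implied: there are only 4 allowed options.
--     normalized = [_normalize_pipeline(r) for r in routes]
--     allowed = PIPELINE_OPTIONS[:-1]
--     hits = [opt for opt in allowed if opt in normalized]
--     hits.sort(key=normalized.index)
--     return hits
-- ===== Notes on version B (the rewrite author's own statement) =====
-- stated objective: alternative
-- what changed: Inverts the iteration: instead of scanning routes while accumulating a deduped, capped list with an early break, B scans the 4 allowed pipeline options, keeps those present among the normalized routes, and sorts them by the index of their first occurrence; the cap of 4 is implied since only 4 options are allowed.
import Mathlib
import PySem

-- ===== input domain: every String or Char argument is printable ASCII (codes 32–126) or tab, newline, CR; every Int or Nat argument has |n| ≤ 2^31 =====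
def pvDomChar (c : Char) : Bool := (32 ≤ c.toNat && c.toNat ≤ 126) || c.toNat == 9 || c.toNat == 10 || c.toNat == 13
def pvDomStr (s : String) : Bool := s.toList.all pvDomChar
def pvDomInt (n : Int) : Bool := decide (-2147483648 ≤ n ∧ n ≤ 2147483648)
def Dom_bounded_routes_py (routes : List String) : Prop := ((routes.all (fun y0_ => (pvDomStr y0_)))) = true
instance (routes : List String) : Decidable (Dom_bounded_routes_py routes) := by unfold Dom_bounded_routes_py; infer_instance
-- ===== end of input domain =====

-- B inverts A's loop: instead of scanning routes accumulating a capped, deduped list,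
-- it scans the 4 allowed options and ranks the present ones by first occurrence
-- (the cap of 4 is implied by there being only 4 allowed options); objective: alternative.

-- ===== PORT A =====
def PIPELINE_OPTIONS : List String := ["pageindex", "sanctions", "nlsql", "graphrag", "fullstack"]

def MAX_FULLSTACK_ROUTE_CALLS : Int := 4

-- `(raw or "")` is the identity up to the subsequent strip/lower (raw is a str; "" stays ""), exact here
def normalize_pipeline (raw : String) : String :=
  let value := PySem.Str.lower (PySem.Str.strip raw)
  if value ∈ PIPELINE_OPTIONS then value else "fullstack"

-- the for-loop with its early `break`, as structural recursion over the remaining routes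
def boundedLoop : List String → List String → List String
  | [], bounded => bounded
  | route :: rest, bounded =>
    let normalized := normalize_pipeline route
    let bounded' :=
      if normalized ∈ PySem.List.slice PIPELINE_OPTIONS none (some (-1)) ∧ normalized ∉ bounded
      then bounded ++ [normalized] else bounded
    if MAX_FULLSTACK_ROUTE_CALLS ≤ (bounded'.length : Int) then bounded'
    else boundedLoop rest bounded'

def bounded_routes_py (routes : List String) : List String :=
  boundedLoop routes []

-- ===== PORT B =====
-- hits.sort(key=normalized.index): every element of hits occurs in normalized, so
-- Python's list.index is total here; `(index? …).getD 0` is exactly its value.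
def bounded_routes_py_alt (routes : List String) : List String :=
  let normalized := routes.map normalize_pipeline
  let allowed := PySem.List.slice PIPELINE_OPTIONS none (some (-1))
  let hits := allowed.filter (fun opt => opt ∈ normalized)
  PySem.List.sorted hits (fun opt => (PySem.List.index? normalized opt).getD 0) false

-- ===== PRECONDITION & SPEC =====
def Spec_bounded_routes_py (routes : List String) (out : List String) : Prop := out = bounded_routes_py_alt routes
instance (routes : List String) (out : List String) : Decidable (Spec_bounded_routes_py routes out) := by unfold Spec_bounded_routes_py; infer_instance

-- ===== CLAIM (what is proved, stated in full; the proofs are below) =====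
def Claim_equal_bounded_routes_py : Prop := ∀ (routes : List String), Dom_bounded_routes_py routes → Spec_bounded_routes_py routes (bounded_routes_py routes)

-- ===== LEMMAS AND PROOFS =====

-- proof-internal notion: ordered first-occurrence dedup (how A's accumulator grows)
def pyDedup : List String → List String
  | [] => []
  | x :: xs => x :: pyDedup (xs.filter (fun y => y ≠ x))
termination_by l => l.length
decreasing_by simp; exact le_trans (List.length_filter_le _ _) (by simp)

theorem pyDedup_cons (x : String) (xs : List String) :
    pyDedup (x :: xs) = x :: pyDedup (xs.filter (fun y => y ≠ x)) := by
  rw [pyDedup]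

theorem mem_pyDedup_aux (x : String) : ∀ (n : Nat) (l : List String), l.length ≤ n →
    (x ∈ pyDedup l ↔ x ∈ l) := by
  intro n
  induction n with
  | zero =>
    intro l hl
    rw [List.length_eq_zero_iff.mp (Nat.le_zero.mp hl)]
    simp [pyDedup]
  | succ n ih =>
    intro l hl
    match l with
    | [] => simp [pyDedup]
    | y :: ys =>
      have hlen : (ys.filter (fun z => z ≠ y)).length ≤ n :=
        le_trans (List.length_filter_le _ _) (by simpa using hl)
      rw [pyDedup_cons, List.mem_cons, ih _ hlen, List.mem_filter]
      by_cases hxy : x = y <;> simp [hxy]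

theorem mem_pyDedup (x : String) (l : List String) : x ∈ pyDedup l ↔ x ∈ l :=
  mem_pyDedup_aux x l.length l le_rfl

theorem filter_filter_not_mem_append (l b : List String) (n : String) :
    (l.filter (fun y => decide (y ∉ b))).filter (fun y => y ≠ n)
      = l.filter (fun y => decide (y ∉ b ++ [n])) := by
  rw [List.filter_filter]
  apply List.filter_congr
  intro x _
  simp [List.mem_append, and_comm, eq_comm (a := x)]

theorem boundedLoop_eq (rs : List String) : ∀ (b : List String), b.Nodup → b.length < 4 →
    boundedLoop rs b
      = (b ++ pyDedup (((rs.map normalize_pipeline).filter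
          (fun n => n ∈ PySem.List.slice PIPELINE_OPTIONS none (some (-1)))).filter
          (fun y => decide (y ∉ b)))).take 4 := by
  induction rs with
  | nil =>
    intro b hnd hlen
    rw [boundedLoop]
    simp only [List.map_nil, List.filter_nil]
    rw [pyDedup]
    simp [List.take_of_length_le (Nat.le_of_lt hlen)]
  | cons r rs ih =>
    intro b hnd hlen
    have hnobreak : ¬ MAX_FULLSTACK_ROUTE_CALLS ≤ (b.length : Int) := by
      simp only [MAX_FULLSTACK_ROUTE_CALLS]; omega
    rw [boundedLoop, List.map_cons]
    by_cases hmem : normalize_pipeline r ∈ PySem.List.slice PIPELINE_OPTIONS none (some (-1))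
    · rw [List.filter_cons_of_pos (p := fun n => decide (n ∈ PySem.List.slice PIPELINE_OPTIONS none (some (-1)))) (decide_eq_true hmem)]
      by_cases hb : normalize_pipeline r ∈ b
      · -- already collected: nothing changes, and the inner filter drops it
        rw [List.filter_cons_of_neg (p := fun y => decide (y ∉ b)) (fun h => absurd (of_decide_eq_true h) (not_not_intro hb))]
        rw [if_neg (show ¬(normalize_pipeline r ∈ PySem.List.slice PIPELINE_OPTIONS none (some (-1))
              ∧ normalize_pipeline r ∉ b) from fun h => h.2 hb), if_neg hnobreak]
        exact ih b hnd hlen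
      · -- new allowed route: appended
        rw [List.filter_cons_of_pos (p := fun y => decide (y ∉ b)) (decide_eq_true hb)]
        rw [if_pos (show normalize_pipeline r ∈ PySem.List.slice PIPELINE_OPTIONS none (some (-1))
              ∧ normalize_pipeline r ∉ b from ⟨hmem, hb⟩), pyDedup_cons, filter_filter_not_mem_append]
        by_cases hfull : 4 ≤ b.length + 1
        · -- break: bounded reached the cap
          have hlen3 : b.length = 3 := by omega
          rw [if_pos (by simp only [MAX_FULLSTACK_ROUTE_CALLS]; simp; omega)]
          rw [show b ++ normalize_pipeline r :: pyDedup (((rs.map normalize_pipeline).filter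
                (fun n => n ∈ PySem.List.slice PIPELINE_OPTIONS none (some (-1)))).filter
                (fun y => decide (y ∉ b ++ [normalize_pipeline r])))
              = (b ++ [normalize_pipeline r]) ++ pyDedup (((rs.map normalize_pipeline).filter
                (fun n => n ∈ PySem.List.slice PIPELINE_OPTIONS none (some (-1)))).filter
                (fun y => decide (y ∉ b ++ [normalize_pipeline r]))) from by simp]
          rw [List.take_append_of_le_length (by simp [hlen3])]
          simp [hlen3, List.take_of_length_le]
        · rw [if_neg (by simp only [MAX_FULLSTACK_ROUTE_CALLS]; simp; omega)]
          have hnd' : (b ++ [normalize_pipeline r]).Nodup := by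
            simp [List.nodup_append, hnd]
            exact fun a ha e => hb (e ▸ ha)
          rw [ih (b ++ [normalize_pipeline r]) hnd' (by simp; omega)]
          simp
    · -- route not allowed: filtered out, loop state unchanged
      rw [List.filter_cons_of_neg (p := fun n => decide (n ∈ PySem.List.slice PIPELINE_OPTIONS none (some (-1)))) (fun h => hmem (of_decide_eq_true h))]
      rw [if_neg (show ¬(normalize_pipeline r ∈ PySem.List.slice PIPELINE_OPTIONS none (some (-1))
            ∧ normalize_pipeline r ∉ b) from fun h => hmem h.1), if_neg hnobreak]
      exact ih b hnd hlen

-- first-occurrence dedup of a filtered list is strictly ordered by first index in the base list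
theorem pyDedup_pairwise_idx : ∀ (ns : List String) (p : String → Bool),
    (pyDedup (ns.filter p)).Pairwise
        (fun a b => (PySem.List.index? ns a).getD 0 < (PySem.List.index? ns b).getD 0)
      ∧ (∀ x ∈ pyDedup (ns.filter p), p x = true ∧ x ∈ ns) := by
  intro ns
  induction ns with
  | nil => intro p; simp [pyDedup]
  | cons n ns ih =>
    intro p
    by_cases hp : p n
    · rw [List.filter_cons_of_pos hp, pyDedup_cons, List.filter_filter]
      obtain ⟨hpw, hmem⟩ := ih (fun y => decide (y ≠ n) && p y)
      have hshift : ∀ x, x ∈ pyDedup (ns.filter fun y => decide (y ≠ n) && p y) →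
          x ≠ n ∧ x ∈ ns ∧ (PySem.List.index? (n :: ns) x).getD 0 = (PySem.List.index? ns x).getD 0 + 1 := by
        intro x hx
        obtain ⟨hq, hxns⟩ := hmem x hx
        have hne : x ≠ n := by simpa using (Bool.and_elim_left hq)
        refine ⟨hne, hxns, ?_⟩
        rw [PySem.List.index?_cons_of_ne ns (Ne.symm hne)]
        obtain ⟨k, hk⟩ := Option.isSome_iff_exists.mp ((PySem.List.index?_isSome_iff _ _).mpr hxns)
        rw [PySem.List.index?_eq_idxOf?] at hk
        simp [hk]
      constructor
      · constructor
        · intro b hb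
          have := (hshift b hb).2.2
          rw [PySem.List.index?_cons_self]
          simp only [Option.getD_some] at *
          omega
        · refine hpw.imp_of_mem ?_
          intro a b ha hb h
          rw [(hshift a ha).2.2, (hshift b hb).2.2]
          omega
      · intro x hx
        rcases List.mem_cons.mp hx with rfl | hx'
        · exact ⟨hp, List.mem_cons_self⟩
        · obtain ⟨hq, hxns⟩ := hmem x hx'
          exact ⟨(Bool.and_elim_right hq), List.mem_cons_of_mem _ hxns⟩
    · rw [List.filter_cons_of_neg (by simpa using hp)]
      obtain ⟨hpw, hmem⟩ := ih p
      have hshift : ∀ x, x ∈ pyDedup (ns.filter p) →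
          (PySem.List.index? (n :: ns) x).getD 0 = (PySem.List.index? ns x).getD 0 + 1 := by
        intro x hx
        obtain ⟨hq, hxns⟩ := hmem x hx
        have hne : n ≠ x := by rintro rfl; simp [hq] at hp
        rw [PySem.List.index?_cons_of_ne ns hne]
        obtain ⟨k, hk⟩ := Option.isSome_iff_exists.mp ((PySem.List.index?_isSome_iff _ _).mpr hxns)
        rw [PySem.List.index?_eq_idxOf?] at hk
        simp [hk]
      refine ⟨hpw.imp_of_mem ?_, fun x hx => ⟨(hmem x hx).1, List.mem_cons_of_mem _ (hmem x hx).2⟩⟩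
      intro a b ha hb h
      rw [hshift a ha, hshift b hb]
      omega

-- ===== VERDICT (by name: the statement is the Claim_ definition above) =====
theorem bounded_routes_py_spec : Claim_equal_bounded_routes_py := by
  intro routes _
  unfold Spec_bounded_routes_py bounded_routes_py bounded_routes_py_alt
  rw [boundedLoop_eq routes [] List.nodup_nil (by simp)]
  simp only [List.nil_append, List.not_mem_nil, not_false_iff, decide_true, List.filter_true]
  set ns := routes.map normalize_pipeline with hns
  set allowed := PySem.List.slice PIPELINE_OPTIONS none (some (-1)) with hallowed
  have hallowed_lit : allowed = ["pageindex", "sanctions", "nlsql", "graphrag"] := by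
    rw [hallowed, PIPELINE_OPTIONS, PySem.List.slice_to_neg_one]; rfl
  set p : String → Bool := fun n => decide (n ∈ allowed) with hp
  obtain ⟨hpw, hmem⟩ := pyDedup_pairwise_idx ns p
  set D := pyDedup (ns.filter p) with hD
  set hits := allowed.filter (fun opt => decide (opt ∈ ns)) with hhits
  -- D is a permutation of hits (both dedup-free lists of the same set)
  have hDnd : D.Nodup := hpw.imp (by intro a b h; rintro rfl; omega)
  have hhnd : hits.Nodup := by
    apply List.Nodup.filter
    rw [hallowed_lit]; decide
  have hperm : D.Perm hits := by
    rw [List.perm_ext_iff_of_nodup hDnd hhnd]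
    intro x
    rw [hD, mem_pyDedup, List.mem_filter, hhits, List.mem_filter]
    simp [hp, and_comm]
  have hsort : PySem.List.sorted hits (fun opt => (PySem.List.index? ns opt).getD 0) = D :=
    PySem.List.sorted_eq_of_perm_of_pairwise_lt hits D _ hperm hpw
  have hlen : D.length ≤ 4 := by
    rw [hperm.length_eq]
    calc hits.length ≤ allowed.length := by rw [hhits]; exact List.length_filter_le _ _
      _ = 4 := by rw [hallowed_lit]; rfl
  rw [List.take_of_length_le hlen, hsort]
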